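-- pv_equiv track=rewrite | github.com/mathelai/github.io | imo2009p6/simulation.py | find_valid_ordering_backtrack
-- ===== SOURCE A (Python) =====
-- from typing import List, Set, Tuple, Optional, Dict
--
-- def find_valid_ordering_backtrack(jumps: List[int], forbidden: Set[int]) -> Optional[List[int]]:
--     """
--     Find a valid ordering using backtracking.
--     More efficient than brute force.
--
--     Args:
--         jumps: List of jump lengths
--         forbidden: Set of forbidden positions
--
--     Returns:
--         A valid ordering if one exists, None otherwise
--     """
--     def backtrack(remaining: List[int], current_sum: int, path: List[int]) -> Optional[List[int]]:
--         if not remaining: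
--             return path
--
--         for i, jump in enumerate(remaining):
--             next_sum = current_sum + jump
--             # Check if this jump would land on a forbidden position
--             # (but allow the final position which equals the total sum)
--             if len(remaining) > 1 and next_sum in forbidden:
--                 continue
--
--             new_remaining = remaining[:i] + remaining[i+1:]
--             result = backtrack(new_remaining, next_sum, path + [jump])
--             if result is not None:
--                 return result
--
--         return None
--
--     return backtrack(jumps, 0, [])
-- ===== SOURCE B (Python) =====
-- def find_valid_ordering_backtrack(jumps, forbidden):
--     """Same DFS order as the index-based backtracking, but decomposed differently:
--     a structurally recursive generator `picks` lazily yields each (chosen, rest)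
--     pair (no indices), and the result is built head-first instead of via a path
--     accumulator."""
--
--     def picks(xs):
--         # lazily yields every way to pick one element, left to right:
--         # picks([a,b,c]) -> (a,[b,c]), (b,[a,c]), (c,[a,b])
--         if xs:
--             head, tail = xs[0], xs[1:]
--             yield head, tail
--             for y, ys in picks(tail):
--                 yield y, [head] + ys
--
--     def search(remaining, current_sum):
--         if not remaining:
--             return []
--         single = len(remaining) == 1
--         for jump, rest in picks(remaining):
--             next_sum = current_sum + jump
--             if not single and next_sum in forbidden:
--                 continue
--             result = search(rest, next_sum)
--             if result is not None:
--                 return [jump] + result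
--         return None
--
--     return search(list(jumps), 0)
-- ===== Notes on version B (the rewrite author's own statement) =====
-- stated objective: alternative
-- what changed: B replaces the index-based enumerate/slice backtracking with a structurally recursive one-element-selection function (picks) producing (chosen, rest) pairs, and builds the result head-first instead of threading a path accumulator; same DFS order and first-found result.
import Mathlib
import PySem

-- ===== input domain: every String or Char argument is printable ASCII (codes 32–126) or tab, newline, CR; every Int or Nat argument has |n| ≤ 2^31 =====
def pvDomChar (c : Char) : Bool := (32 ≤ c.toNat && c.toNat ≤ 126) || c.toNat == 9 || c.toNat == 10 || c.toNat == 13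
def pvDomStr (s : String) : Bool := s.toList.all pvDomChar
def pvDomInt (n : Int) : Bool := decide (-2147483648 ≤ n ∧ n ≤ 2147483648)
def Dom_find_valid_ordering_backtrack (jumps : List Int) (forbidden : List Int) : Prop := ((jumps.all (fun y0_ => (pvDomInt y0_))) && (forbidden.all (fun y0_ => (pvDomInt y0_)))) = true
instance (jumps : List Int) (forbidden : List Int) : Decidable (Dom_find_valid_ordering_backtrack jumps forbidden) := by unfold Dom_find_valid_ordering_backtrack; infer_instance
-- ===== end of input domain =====

-- B decomposes the same DFS differently: a structurally recursive one-element-selection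
-- function (picks) replaces the enumerate/slice index loop, and the result is built
-- head-first instead of through a path accumulator (alternative decomposition, same cost).

-- ===== PORT A =====
-- A's `for i, jump in enumerate(remaining)` loop; `next` is the recursive backtrack call
-- (fuel-indexed structural recursion: fuel = remaining.length at every call).
def pvA_loop (forb : List Int) (next : List Int → Int → List Int → Option (List Int))
    (rem : List Int) (s : Int) (path : List Int) : List (Int × Int) → Option (List Int)
  | [] => none
  | (i, jump) :: rest =>
    let next_sum := s + jump
    if 1 < rem.length ∧ next_sum ∈ forb then pvA_loop forb next rem s path rest
    else
      -- remaining[:i] + remaining[i+1:]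
      match next (PySem.List.slice rem none (some i) ++ PySem.List.slice rem (some (i + 1)) none)
            next_sum (path ++ [jump]) with
      | some r => some r
      | none => pvA_loop forb next rem s path rest

def pvA_bt (forb : List Int) : Nat → List Int → Int → List Int → Option (List Int)
  | _, [], _, path => some path
  | 0, _ :: _, _, _ => none   -- unreachable: fuel = remaining.length at every call
  | fuel + 1, rem@(_ :: _), s, path =>
    pvA_loop forb (pvA_bt forb fuel) rem s path (PySem.List.enumerate rem)

def find_valid_ordering_backtrack (jumps : List Int) (forbidden : List Int) : Option (List Int) :=
  pvA_bt forbidden jumps.length jumps 0 []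

-- ===== PORT B =====
-- B's `picks`: all ways to select one element, by structural recursion on the list.
def pvPicks : List Int → List (Int × List Int)
  | [] => []
  | x :: xs => (x, xs) :: (pvPicks xs).map (fun p => (p.1, x :: p.2))

-- B's `for jump, rest in picks(remaining)` loop; `single` was computed before the loop.
def pvTry (forb : List Int) (next : List Int → Int → Option (List Int))
    (single : Bool) (s : Int) : List (Int × List Int) → Option (List Int)
  | [] => none
  | (j, rest) :: ps =>
    let next_sum := s + j
    if ¬ single = true ∧ next_sum ∈ forb then pvTry forb next single s ps
    else
      match next rest next_sum with
      | some r => some (j :: r)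
      | none => pvTry forb next single s ps

def pvSearch (forb : List Int) : Nat → List Int → Int → Option (List Int)
  | _, [], _ => some []
  | 0, _ :: _, _ => none   -- unreachable: fuel = remaining.length at every call
  | fuel + 1, rem@(_ :: _), s =>
    pvTry forb (pvSearch forb fuel) (rem.length == 1) s (pvPicks rem)

def find_valid_ordering_backtrack_alt (jumps : List Int) (forbidden : List Int) : Option (List Int) :=
  pvSearch forbidden jumps.length jumps 0

-- ===== PRECONDITION & SPEC =====
def Spec_find_valid_ordering_backtrack (jumps : List Int) (forbidden : List Int) (out : Option (List Int)) : Prop := out = find_valid_ordering_backtrack_alt jumps forbidden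
instance (jumps : List Int) (forbidden : List Int) (out : Option (List Int)) : Decidable (Spec_find_valid_ordering_backtrack jumps forbidden out) := by unfold Spec_find_valid_ordering_backtrack; infer_instance

-- ===== CLAIM (what is proved, stated in full; the proofs are below) =====
def Claim_equal_find_valid_ordering_backtrack : Prop := ∀ (jumps : List Int) (forbidden : List Int), Dom_find_valid_ordering_backtrack jumps forbidden → Spec_find_valid_ordering_backtrack jumps forbidden (find_valid_ordering_backtrack jumps forbidden)

-- ===== LEMMAS AND PROOFS =====

-- Path-free reference function (Nat indices): both ports are proved equal to it.
def pvP_loop (forb : List Int) (next : List Int → Int → Option (List Int))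
    (rem : List Int) (s : Int) : List Nat → Option (List Int)
  | [] => none
  | k :: ks =>
    let next_sum := s + rem.getD k 0
    if 1 < rem.length ∧ next_sum ∈ forb then pvP_loop forb next rem s ks
    else
      match next (rem.take k ++ rem.drop (k + 1)) next_sum with
      | some r => some (rem.getD k 0 :: r)
      | none => pvP_loop forb next rem s ks

def pvP (forb : List Int) : Nat → List Int → Int → Option (List Int)
  | _, [], _ => some []
  | 0, _ :: _, _ => none
  | fuel + 1, rem@(_ :: _), s =>
    pvP_loop forb (pvP forb fuel) rem s (List.range rem.length)

theorem len_erase_at {rem : List Int} {k : Nat} (hk : k < rem.length) :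
    (rem.take k ++ rem.drop (k + 1)).length = rem.length - 1 := by
  simp [List.length_take, List.length_drop]
  omega

-- ===== A = reference =====
theorem pvA_loop_eq (forb : List Int) (fuel : Nat)
    (IH : ∀ rem' s' path', rem'.length = fuel →
      pvA_bt forb fuel rem' s' path' = (pvP forb fuel rem' s').map (path' ++ ·))
    (rem : List Int) (s : Int) (path : List Int) (hlen : rem.length = fuel + 1) :
    ∀ ks : List Nat, (∀ k ∈ ks, k < rem.length) →
      pvA_loop forb (pvA_bt forb fuel) rem s path
        (ks.map fun (k : Nat) => ((k : Int), rem.getD k 0)) =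
      (pvP_loop forb (pvP forb fuel) rem s ks).map (path ++ ·) := by
  intro ks
  induction ks with
  | nil => intro _; simp [pvA_loop, pvP_loop]
  | cons k ks ih =>
    intro hb
    have hk : k < rem.length := hb k (by simp)
    have hks : ∀ k' ∈ ks, k' < rem.length := fun k' h => hb k' (by simp [h])
    by_cases hskip : 1 < rem.length ∧ s + rem.getD k 0 ∈ forb
    · simp only [List.map_cons, pvA_loop, pvP_loop, if_pos hskip]
      exact ih hks
    · have hslice : PySem.List.slice rem none (some ((k : Int))) ++
          PySem.List.slice rem (some ((k : Int) + 1)) none = rem.take k ++ rem.drop (k + 1) := by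
        have h1 : ((k : Int) + 1) = ((k + 1 : Nat) : Int) := by push_cast; ring
        rw [h1, PySem.List.slice_to_natCast, PySem.List.slice_from_natCast]
      have hrec := IH (rem.take k ++ rem.drop (k + 1)) (s + rem.getD k 0) (path ++ [rem.getD k 0])
        (by rw [len_erase_at hk]; omega)
      simp only [List.map_cons, pvA_loop, pvP_loop, if_neg hskip, hslice, hrec]
      cases hp : pvP forb fuel (rem.take k ++ rem.drop (k + 1)) (s + rem.getD k 0) with
      | some r => simp
      | none => simpa using ih hks

theorem pvA_eq (forb : List Int) :
    ∀ fuel (rem : List Int) (s : Int) (path : List Int), rem.length = fuel →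
      pvA_bt forb fuel rem s path = (pvP forb fuel rem s).map (path ++ ·) := by
  intro fuel
  induction fuel with
  | zero =>
    intro rem s path hlen
    cases rem with
    | nil => simp [pvA_bt, pvP]
    | cons a t => simp at hlen
  | succ fuel IH =>
    intro rem s path hlen
    cases rem with
    | nil => simp at hlen
    | cons a t =>
      have henum : PySem.List.enumerate (a :: t) =
          (List.range (a :: t).length).map fun (k : Nat) => ((k : Int), (a :: t).getD k 0) := by
        rw [PySem.List.enumerate_eq_map_pyRange (d := 0), PySem.List.pyRange_one]
        simp only [Int.sub_zero, List.map_map]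
        refine List.map_congr_left (fun k hk => ?_)
        simp [PySem.List.pyGetD_natCast]
      rw [show pvA_bt forb (fuel + 1) (a :: t) s path =
            pvA_loop forb (pvA_bt forb fuel) (a :: t) s path (PySem.List.enumerate (a :: t)) from rfl,
          show pvP forb (fuel + 1) (a :: t) s =
            pvP_loop forb (pvP forb fuel) (a :: t) s (List.range (a :: t).length) from rfl,
          henum]
      exact pvA_loop_eq forb fuel IH (a :: t) s path hlen (List.range (a :: t).length)
        (fun k hk => List.mem_range.mp hk)

-- ===== B = reference =====
-- picks enumerates exactly the index-based selections, in the same order.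
theorem pvPicks_eq : ∀ rem : List Int,
    pvPicks rem = (List.range rem.length).map
      (fun k => (rem.getD k 0, rem.take k ++ rem.drop (k + 1))) := by
  intro rem
  induction rem with
  | nil => simp [pvPicks]
  | cons x xs ih =>
    rw [show pvPicks (x :: xs) = (x, xs) :: (pvPicks xs).map (fun p => (p.1, x :: p.2)) from rfl,
        ih, List.length_cons, List.range_succ_eq_map]
    simp [List.map_map, Function.comp, List.getD]

theorem pvTry_eq (forb : List Int) (fuel : Nat)
    (IH : ∀ rem' s', rem'.length = fuel → pvSearch forb fuel rem' s' = pvP forb fuel rem' s')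
    (rem : List Int) (s : Int) (hlen : rem.length = fuel + 1) :
    ∀ ks : List Nat, (∀ k ∈ ks, k < rem.length) →
      pvTry forb (pvSearch forb fuel) (rem.length == 1) s
        (ks.map fun k => (rem.getD k 0, rem.take k ++ rem.drop (k + 1))) =
      pvP_loop forb (pvP forb fuel) rem s ks := by
  intro ks
  induction ks with
  | nil => intro _; simp [pvTry, pvP_loop]
  | cons k ks ih =>
    intro hb
    have hk : k < rem.length := hb k (by simp)
    have hks : ∀ k' ∈ ks, k' < rem.length := fun k' h => hb k' (by simp [h])
    have hcond : (¬ (rem.length == 1) = true ∧ s + rem.getD k 0 ∈ forb) ↔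
        (1 < rem.length ∧ s + rem.getD k 0 ∈ forb) := by
      constructor
      · rintro ⟨h1, h2⟩
        refine ⟨?_, h2⟩
        have : rem.length ≠ 1 := by simpa using h1
        omega
      · rintro ⟨h1, h2⟩
        refine ⟨by simp; omega, h2⟩
    by_cases hskip : 1 < rem.length ∧ s + rem.getD k 0 ∈ forb
    · simp only [List.map_cons, pvTry, pvP_loop, if_pos hskip, if_pos (hcond.mpr hskip)]
      exact ih hks
    · have hrec := IH (rem.take k ++ rem.drop (k + 1)) (s + rem.getD k 0)
        (by rw [len_erase_at hk]; omega)
      simp only [List.map_cons, pvTry, pvP_loop, if_neg hskip, if_neg (fun h => hskip (hcond.mp h)),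
        hrec]
      cases pvP forb fuel (rem.take k ++ rem.drop (k + 1)) (s + rem.getD k 0) with
      | some r => rfl
      | none => exact ih hks

theorem pvB_eq (forb : List Int) :
    ∀ fuel (rem : List Int) (s : Int), rem.length = fuel →
      pvSearch forb fuel rem s = pvP forb fuel rem s := by
  intro fuel
  induction fuel with
  | zero =>
    intro rem s hlen
    cases rem with
    | nil => simp [pvSearch, pvP]
    | cons a t => simp at hlen
  | succ fuel IH =>
    intro rem s hlen
    cases rem with
    | nil => simp at hlen
    | cons a t =>
      rw [show pvSearch forb (fuel + 1) (a :: t) s =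
            pvTry forb (pvSearch forb fuel) ((a :: t).length == 1) s (pvPicks (a :: t)) from rfl,
          show pvP forb (fuel + 1) (a :: t) s =
            pvP_loop forb (pvP forb fuel) (a :: t) s (List.range (a :: t).length) from rfl,
          pvPicks_eq]
      exact pvTry_eq forb fuel IH (a :: t) s hlen (List.range (a :: t).length)
        (fun k hk => List.mem_range.mp hk)

-- ===== VERDICT (by name: the statement is the Claim_ definition above) =====
theorem find_valid_ordering_backtrack_spec : Claim_equal_find_valid_ordering_backtrack := by
  intro jumps forbidden _
  unfold Spec_find_valid_ordering_backtrack find_valid_ordering_backtrack find_valid_ordering_backtrack_alt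
  rw [pvA_eq forbidden jumps.length jumps 0 [] rfl, pvB_eq forbidden jumps.length jumps 0 rfl]
  cases pvP forbidden jumps.length jumps 0 <;> simp
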